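-- pv_equiv track=rewrite | github.com/WoWs-Builder-Team/minimap_renderer | renderer/layers/chat.py | unpack_color
-- ===== SOURCE A (Python) =====
-- def unpack_color(packed_value: int) -> tuple:
--     bits = [8, 8, 8]
--     values = []
--     for bit in bits:
--         value = packed_value & (2**bit - 1)
--         packed_value = packed_value >> bit
--         values.append(value)
--     return tuple(reversed(values))
-- ===== SOURCE B (Python) =====
-- def unpack_color(packed_value: int) -> tuple:
--     return ((packed_value >> 16) & 0xFF, (packed_value >> 8) & 0xFF, packed_value & 0xFF)
-- ===== Notes on version B (the rewrite author's own statement) =====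
-- stated objective: simpler
-- what changed: Replaced the loop that masks/shifts/appends low-to-high and then reverses with a single closed-form tuple extracting each byte by its fixed shift (16, 8, 0).
import Mathlib
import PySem

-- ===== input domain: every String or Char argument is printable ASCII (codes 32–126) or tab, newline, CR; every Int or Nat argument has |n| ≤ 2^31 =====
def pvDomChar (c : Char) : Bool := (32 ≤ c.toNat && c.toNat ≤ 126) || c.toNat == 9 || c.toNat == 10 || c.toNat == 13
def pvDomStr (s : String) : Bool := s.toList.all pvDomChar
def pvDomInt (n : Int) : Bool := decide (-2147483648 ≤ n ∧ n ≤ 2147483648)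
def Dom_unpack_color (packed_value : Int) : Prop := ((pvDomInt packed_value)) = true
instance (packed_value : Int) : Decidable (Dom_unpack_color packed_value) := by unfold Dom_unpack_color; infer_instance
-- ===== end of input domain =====

-- ===== PORT A =====
-- B replaces A's mask-shift-append loop and final reversal with a closed-form
-- tuple extracting each byte by its fixed shift (simpler decomposition).
-- Loop 'for bit in bits' ported as a foldl over the same (packed, values) state;
-- 'tuple(reversed(values))' becomes a match on the reversed 3-element list.
def unpack_color (packed_value : Int) : Int × Int × Int :=
  let bits : List Int := [8, 8, 8]
  let st := bits.foldl (fun (st : Int × List Int) bit =>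
    let value := PySem.Int.band st.1 (2 ^ bit.toNat - 1)
    let packed := st.1 >>> bit.toNat
    (packed, st.2 ++ [value])) (packed_value, [])
  match st.2.reverse with
  | [a, b, c] => (a, b, c)
  | _ => (0, 0, 0)

-- ===== PORT B =====
def unpack_color_alt (packed_value : Int) : Int × Int × Int :=
  (PySem.Int.band (packed_value >>> (16:Nat)) 0xFF,
   PySem.Int.band (packed_value >>> (8:Nat)) 0xFF,
   PySem.Int.band packed_value 0xFF)

-- ===== PRECONDITION & SPEC =====
def Spec_unpack_color (packed_value : Int) (out : Int × Int × Int) : Prop := out = unpack_color_alt packed_value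
instance (packed_value : Int) (out : Int × Int × Int) : Decidable (Spec_unpack_color packed_value out) := by unfold Spec_unpack_color; infer_instance

-- ===== CLAIM (what is proved, stated in full; the proofs are below) =====
def Claim_equal_unpack_color : Prop := ∀ (packed_value : Int), Dom_unpack_color packed_value → Spec_unpack_color packed_value (unpack_color packed_value)

-- ===== LEMMAS AND PROOFS =====

-- ===== VERDICT (by name: the statement is the Claim_ definition above) =====
theorem unpack_color_spec : Claim_equal_unpack_color := by
  intro p _
  show _ = _
  have h8 : Int.toNat 8 = 8 := rfl
  have hm : (2:Int) ^ (8:Nat) - 1 = 255 := by norm_num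
  simp only [unpack_color, unpack_color_alt, List.foldl, h8, hm, List.reverse_cons,
    List.reverse_nil, List.nil_append, List.cons_append]
  have hsh : ∀ (m : Int), m >>> (8:Int) = m / 256 := fun m => by
    rw [show (8:Int) = ((8:Nat):Int) by norm_num, Int.shiftRight_natCast_right,
      Int.shiftRight_eq_div_pow]; norm_num
  simp [hsh, Int.shiftRight_eq_div_pow, Int.ediv_ediv_of_nonneg]
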